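-- pv_equiv track=rewrite | github.com/JWillegers/AdventOfCode2022 | solutions/day22.py | part1_wrap
-- ===== SOURCE A (Python) =====
-- free_space = '.'
--
-- rock = '#'
--
-- def part1_wrap(my_map, row, col, d_row, d_col, location):
--     if d_row == 1:
--         for j in range(len(my_map)):
--             if my_map[j][col] == rock:
--                 break
--             elif my_map[j][col] == free_space:
--                 location[0] = j
--                 break
--     elif d_row == -1:
--         for j in range(len(my_map) - 1, -1, -1):
--             if my_map[j][col] == rock:
--                 break
--             elif my_map[j][col] == free_space:
--                 location[0] = j
--                 break
--     elif d_col == 1: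
--         for j in range(len(my_map[row])):
--             if my_map[row][j] == rock:
--                 break
--             elif my_map[row][j] == free_space:
--                 location[1] = j
--                 break
--     elif d_col == -1:
--         for j in range(len(my_map[row]) - 1, -1, -1):
--             if my_map[row][j] == rock:
--                 break
--             elif my_map[row][j] == free_space:
--                 location[1] = j
--                 break
--     return location
-- ===== SOURCE B (Python) =====
-- free_space = '.'
--
-- rock = '#'
--
--
-- def _first_marker(get, j, step, stop):
--     # Recursively walk from j toward stop, returning the first non-blank cell
--     # (index, char) or None; blank cells are anything but rock/free_space.
--     if j == stop:
--         return None
--     c = get(j)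
--     if c == rock or c == free_space:
--         return (j, c)
--     return _first_marker(get, j + step, step, stop)
--
--
-- def part1_wrap(my_map, row, col, d_row, d_col, location):
--     # Unified dispatch: pick the orientation (d_row first, as in the original),
--     # then find the first marker cell along the walk and decide afterwards.
--     if d_row in (1, -1):
--         slot, step, n = 0, d_row, len(my_map)
--         get = lambda j: my_map[j][col]
--     elif d_col in (1, -1):
--         slot, step, n = 1, d_col, len(my_map[row])
--         get = lambda j: my_map[row][j]
--     else:
--         return location
--     start, stop = (0, n) if step == 1 else (n - 1, -1)
--     hit = _first_marker(get, start, step, stop)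
--     if hit is not None and hit[1] == free_space:
--         location[slot] = hit[0]
--     return location
-- ===== Notes on version B (the rewrite author's own statement) =====
-- stated objective: simpler
-- what changed: B replaces A's four in-loop break/mutate for-loops by one unified dispatch plus a recursive find-first-marker helper that returns the first non-blank cell as an Option; the decision (write the index iff that cell is free space) happens once, after the search.
-- outside the precondition, e.g. on part1_wrap([['#'], []], 0, 0, 1, 0, [5, 5]): A returns [5, 5], B returns [5, 5]; on part1_wrap([['#']], 0, 0, 1, 0, []): A returns [], B returns []
import Mathlib
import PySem

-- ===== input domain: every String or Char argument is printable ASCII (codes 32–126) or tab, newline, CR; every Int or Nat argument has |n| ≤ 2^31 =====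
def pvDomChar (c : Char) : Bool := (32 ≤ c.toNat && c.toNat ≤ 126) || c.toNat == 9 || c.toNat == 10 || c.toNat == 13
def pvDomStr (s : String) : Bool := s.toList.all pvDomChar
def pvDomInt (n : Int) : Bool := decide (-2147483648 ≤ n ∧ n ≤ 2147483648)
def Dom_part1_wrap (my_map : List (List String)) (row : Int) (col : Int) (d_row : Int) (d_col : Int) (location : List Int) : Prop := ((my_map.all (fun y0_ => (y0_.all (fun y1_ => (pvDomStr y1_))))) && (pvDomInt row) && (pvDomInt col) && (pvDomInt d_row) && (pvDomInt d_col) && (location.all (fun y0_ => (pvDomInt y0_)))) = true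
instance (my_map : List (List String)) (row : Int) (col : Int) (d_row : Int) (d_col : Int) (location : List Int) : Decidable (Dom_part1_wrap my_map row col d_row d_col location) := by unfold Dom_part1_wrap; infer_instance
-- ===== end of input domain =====

-- ===== PORT A =====
-- B replaces A's four break/mutate loops by one dispatch and a recursive Option-returning
-- first-marker search, deciding the write afterwards (objective: simpler).
-- Equivalence is about the RETURN value; both Pythons also mutate `location` in place identically.

-- cell access my_map[j][col] (total form; exact under Pre_'s in-range conditions)
def pvCellA (my_map : List (List String)) (j : Int) (col : Int) : String :=
  PySem.List.pyGetD (PySem.List.pyGetD my_map j []) col ""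

-- the vertical for-loop of A: scan column `col` over the index list, break on rock/free space
def pvScanColA (my_map : List (List String)) (col : Int) (location : List Int) :
    List Int → List Int
  | [] => location
  | j :: rest =>
    if pvCellA my_map j col = "#" then location
    else if pvCellA my_map j col = "." then PySem.List.pySetD location 0 j
    else pvScanColA my_map col location rest

-- the horizontal for-loop of A: scan row my_map[row] over the index list
def pvScanRowA (my_map : List (List String)) (row : Int) (location : List Int) :
    List Int → List Int
  | [] => location
  | j :: rest =>
    if PySem.List.pyGetD (PySem.List.pyGetD my_map row []) j "" = "#" then location
    else if PySem.List.pyGetD (PySem.List.pyGetD my_map row []) j "" = "." then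
      PySem.List.pySetD location 1 j
    else pvScanRowA my_map row location rest

def part1_wrap (my_map : List (List String)) (row : Int) (col : Int) (d_row : Int) (d_col : Int) (location : List Int) : List Int :=
  if d_row = 1 then
    pvScanColA my_map col location (PySem.List.pyRange 0 my_map.length 1)
  else if d_row = -1 then
    pvScanColA my_map col location (PySem.List.pyRange ((my_map.length : Int) - 1) (-1) (-1))
  else if d_col = 1 then
    pvScanRowA my_map row location
      (PySem.List.pyRange 0 (PySem.List.pyGetD my_map row []).length 1)
  else if d_col = -1 then
    pvScanRowA my_map row location
      (PySem.List.pyRange (((PySem.List.pyGetD my_map row []).length : Int) - 1) (-1) (-1))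
  else location

-- ===== PORT B =====
-- B's recursive helper _first_marker: walk from j toward stop (fuel realises the
-- finitely many steps the Python recursion takes; the `j = stop` guard is B's own)
def pvFirstMarker (get : Int → String) : Nat → Int → Int → Int → Option (Int × String)
  | 0, _, _, _ => none
  | fuel + 1, j, step, stop =>
    if j = stop then none
    else
      let c := get j
      if c = "#" ∨ c = "." then some (j, c)
      else pvFirstMarker get fuel (j + step) step stop

def part1_wrap_alt (my_map : List (List String)) (row : Int) (col : Int) (d_row : Int) (d_col : Int) (location : List Int) : List Int :=
  if d_row = 1 ∨ d_row = -1 then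
    let get := fun j => pvCellA my_map j col
    let n : Int := my_map.length
    let start : Int := if d_row = 1 then 0 else n - 1
    let stop : Int := if d_row = 1 then n else -1
    match pvFirstMarker get my_map.length start d_row stop with
    | some (j, c) => if c = "." then PySem.List.pySetD location 0 j else location
    | none => location
  else if d_col = 1 ∨ d_col = -1 then
    let line := PySem.List.pyGetD my_map row []
    let get := fun j => PySem.List.pyGetD line j ""
    let n : Int := line.length
    let start : Int := if d_col = 1 then 0 else n - 1
    let stop : Int := if d_col = 1 then n else -1
    match pvFirstMarker get line.length start d_col stop with
    | some (j, c) => if c = "." then PySem.List.pySetD location 1 j else location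
    | none => location
  else location

-- ===== PRECONDITION & SPEC =====
-- Pre_ excludes inputs where Python A raises an IndexError (an out-of-range cell access
-- during the scan, or a write into a too-short `location`); being a closed form it is
-- slightly wider: it also excludes ragged grids / short locations that the scan breaks
-- before reaching — there A returns normally and B returns the very same value.
def Pre_part1_wrap (my_map : List (List String)) (row : Int) (col : Int) (d_row : Int) (d_col : Int) (location : List Int) : Prop :=
  (d_row = 1 ∨ d_row = -1 →
    (∀ r ∈ my_map, PySem.Raise.InRange r.length col) ∧ 1 ≤ location.length) ∧
  (¬(d_row = 1 ∨ d_row = -1) → (d_col = 1 ∨ d_col = -1) →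
    PySem.Raise.InRange my_map.length row ∧ 2 ≤ location.length)
instance (my_map : List (List String)) (row : Int) (col : Int) (d_row : Int) (d_col : Int) (location : List Int) : Decidable (Pre_part1_wrap my_map row col d_row d_col location) := by unfold Pre_part1_wrap; infer_instance

def pvWitness_part1_wrap : List (List String) × Int × Int × Int × Int × List Int :=
  ([[" ", "#"], [".", "."]], 0, 1, 1, 0, [9, 9])

def Spec_part1_wrap (my_map : List (List String)) (row : Int) (col : Int) (d_row : Int) (d_col : Int) (location : List Int) (out : List Int) : Prop := out = part1_wrap_alt my_map row col d_row d_col location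
instance (my_map : List (List String)) (row : Int) (col : Int) (d_row : Int) (d_col : Int) (location : List Int) (out : List Int) : Decidable (Spec_part1_wrap my_map row col d_row d_col location out) := by unfold Spec_part1_wrap; infer_instance

-- ===== CLAIM (what is proved, stated in full; the proofs are below) =====
def Claim_equal_part1_wrap : Prop := ∀ (my_map : List (List String)) (row : Int) (col : Int) (d_row : Int) (d_col : Int) (location : List Int), Dom_part1_wrap my_map row col d_row d_col location → Pre_part1_wrap my_map row col d_row d_col location → Spec_part1_wrap my_map row col d_row d_col location (part1_wrap my_map row col d_row d_col location)

-- ===== LEMMAS AND PROOFS =====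

theorem pvWitness_pre :
    Pre_part1_wrap pvWitness_part1_wrap.1 pvWitness_part1_wrap.2.1 pvWitness_part1_wrap.2.2.1
      pvWitness_part1_wrap.2.2.2.1 pvWitness_part1_wrap.2.2.2.2.1 pvWitness_part1_wrap.2.2.2.2.2 := by
  decide

-- list-level first-marker specification connecting the two ports
def pvFirstMarkerL (get : Int → String) : List Int → Option (Int × String)
  | [] => none
  | j :: rest =>
    if get j = "#" ∨ get j = "." then some (j, get j) else pvFirstMarkerL get rest

-- A's column loop is: find the first marker in the index list, then decide
theorem scanColA_eq (my_map : List (List String)) (col : Int) (location : List Int)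
    (idxs : List Int) :
    pvScanColA my_map col location idxs
      = match pvFirstMarkerL (fun j => pvCellA my_map j col) idxs with
        | some (j, c) => if c = "." then PySem.List.pySetD location 0 j else location
        | none => location := by
  induction idxs with
  | nil => rfl
  | cons j rest ih =>
    by_cases h1 : pvCellA my_map j col = "#" <;>
      by_cases h2 : pvCellA my_map j col = "." <;>
      simp [pvScanColA, pvFirstMarkerL, h1, h2, ih]

-- A's row loop is: find the first marker in the index list, then decide
theorem scanRowA_eq (my_map : List (List String)) (row : Int) (location : List Int)
    (idxs : List Int) :
    pvScanRowA my_map row location idxs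
      = match pvFirstMarkerL
            (fun j => PySem.List.pyGetD (PySem.List.pyGetD my_map row []) j "") idxs with
        | some (j, c) => if c = "." then PySem.List.pySetD location 1 j else location
        | none => location := by
  induction idxs with
  | nil => rfl
  | cons j rest ih =>
    by_cases h1 : PySem.List.pyGetD (PySem.List.pyGetD my_map row []) j "" = "#" <;>
      by_cases h2 : PySem.List.pyGetD (PySem.List.pyGetD my_map row []) j "" = "." <;>
      simp [pvScanRowA, pvFirstMarkerL, h1, h2, ih]

-- B's recursive ascending walk from j with fuel f and stop j + f is the list-level search
theorem firstMarker_up (get : Int → String) (f : Nat) :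
    ∀ j : Int, pvFirstMarker get f j 1 (j + f)
      = pvFirstMarkerL get (PySem.List.pyRange j (j + f) 1) := by
  induction f with
  | zero =>
    intro j
    rw [PySem.List.pyRange_one_eq_nil (by omega)]
    rfl
  | succ f ih =>
    intro j
    push_cast
    rw [PySem.List.pyRange_one_cons (by omega : j < j + ((f : Int) + 1))]
    simp only [pvFirstMarker, pvFirstMarkerL]
    rw [if_neg (by omega : ¬ j = j + ((f : Int) + 1))]
    by_cases h : get j = "#" ∨ get j = "."
    · simp only [h, if_true]
    · simp only [h, if_false]
      have e : j + ((f : Int) + 1) = (j + 1) + (f : Int) := by ring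
      rw [e]
      exact ih (j + 1)

-- B's recursive descending walk from stop + f with fuel f is the list-level search
theorem firstMarker_down (get : Int → String) (f : Nat) :
    ∀ stop : Int, pvFirstMarker get f (stop + f) (-1) stop
      = pvFirstMarkerL get (PySem.List.pyRange (stop + f) stop (-1)) := by
  induction f with
  | zero =>
    intro stop
    rw [PySem.List.pyRange_neg_one_eq_nil (by omega)]
    rfl
  | succ f ih =>
    intro stop
    push_cast
    rw [PySem.List.pyRange_neg_one_cons (by omega : stop < stop + ((f : Int) + 1))]
    simp only [pvFirstMarker, pvFirstMarkerL]
    rw [if_neg (by omega : ¬ stop + ((f : Int) + 1) = stop)]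
    by_cases h : get (stop + ((f : Int) + 1)) = "#" ∨ get (stop + ((f : Int) + 1)) = "."
    · simp only [h, if_true]
    · simp only [h, if_false]
      have e1 : stop + ((f : Int) + 1) + -1 = stop + (f : Int) := by ring
      have e2 : stop + ((f : Int) + 1) - 1 = stop + (f : Int) := by ring
      rw [e1, e2]
      exact ih stop

-- ===== VERDICT (by name: the statement is the Claim_ definition above) =====
theorem part1_wrap_spec : Claim_equal_part1_wrap := by
  intro my_map row col d_row d_col location _ _
  unfold Spec_part1_wrap part1_wrap part1_wrap_alt
  have hu1 := firstMarker_up (fun j => pvCellA my_map j col) my_map.length 0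
  rw [zero_add] at hu1
  have hd1 := firstMarker_down (fun j => pvCellA my_map j col) my_map.length (-1)
  rw [show (-1 : Int) + (my_map.length : Int) = (my_map.length : Int) - 1 by ring] at hd1
  have hu2 := firstMarker_up
      (fun j => PySem.List.pyGetD (PySem.List.pyGetD my_map row []) j "")
      (PySem.List.pyGetD my_map row []).length 0
  rw [zero_add] at hu2
  have hd2 := firstMarker_down
      (fun j => PySem.List.pyGetD (PySem.List.pyGetD my_map row []) j "")
      (PySem.List.pyGetD my_map row []).length (-1)
  rw [show (-1 : Int) + ((PySem.List.pyGetD my_map row []).length : Int)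
        = ((PySem.List.pyGetD my_map row []).length : Int) - 1 by ring] at hd2
  by_cases h1 : d_row = 1 <;> by_cases h2 : d_row = -1 <;>
    by_cases h3 : d_col = 1 <;> by_cases h4 : d_col = -1 <;>
    first
    | omega
    | simp [h1, h2, h3, h4, scanColA_eq, scanRowA_eq, hu1, hd1, hu2, hd2]
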